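-- pv_equiv track=rewrite | github.com/dynamiq-ai/dynamiq | dynamiq/callbacks/streaming.py | _find_unescaped_quote_end
-- ===== SOURCE A (Python) =====
-- def _find_unescaped_quote_end(input_string: str, start_quote_index: int) -> int:
--     """
--     Return index of the next unescaped '"' after start_quote_index, or -1 if not complete yet.
--
--     Args:
--         input_string (str): The string to search in.
--         start_quote_index (int): The index of the starting quote.
--
--     Returns:
--         int: The index of the next unescaped quote, or -1 if not found.
--     """
--     current_index = start_quote_index + 1
--     while current_index < len(input_string):
--         if input_string[current_index] == '"':
--             # Count preceding backslashes
--             backslash_count = 0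
--             previous_index = current_index - 1
--             while previous_index >= 0 and input_string[previous_index] == "\\":
--                 backslash_count += 1
--                 previous_index -= 1
--             if backslash_count % 2 == 0:
--                 return current_index
--         current_index += 1
--     return -1
-- ===== SOURCE B (Python) =====
-- def _find_unescaped_quote_end(input_string: str, start_quote_index: int) -> int:
--     n = len(input_string)
--     i = max(start_quote_index + 1, 0)
--     if i >= n:
--         return -1
--     # Parity of the backslash run ending just before the scan start.
--     j = i - 1
--     while j >= 0 and input_string[j] == "\\":
--         j -= 1
--     escaped = (i - 1 - j) % 2 == 1
--     # Single forward pass maintaining the escape-state toggle.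
--     for k in range(i, n):
--         c = input_string[k]
--         if c == '"' and not escaped:
--             return k
--         escaped = c == "\\" and not escaped
--     return -1
-- ===== Notes on version B (the rewrite author's own statement) =====
-- stated objective: alternative
-- what changed: A re-counts the preceding backslash run backwards at every quote it meets; B clamps the scan start to 0, seeds an escape flag once with the parity of the backslash run before the start, and makes a single forward pass toggling that flag.
-- intended difference: When start_quote_index+1 is negative and Python's negative-index wraparound lets A meet a quote among the string's last -(start_quote_index+1) characters whose index it can return (a quote strictly inside that tail, or a final-character quote while the string holds an unescaped quote), A returns that quote's NEGATIVE index (or -1); B scans forward from index 0 and returns the first unescaped quote's nonnegative index (or -1), the intended 'index of the next unescaped quote'. — e.g. on _find_unescaped_quote_end("a\"c", -3): A returns -2, B returns 1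
import Mathlib
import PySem

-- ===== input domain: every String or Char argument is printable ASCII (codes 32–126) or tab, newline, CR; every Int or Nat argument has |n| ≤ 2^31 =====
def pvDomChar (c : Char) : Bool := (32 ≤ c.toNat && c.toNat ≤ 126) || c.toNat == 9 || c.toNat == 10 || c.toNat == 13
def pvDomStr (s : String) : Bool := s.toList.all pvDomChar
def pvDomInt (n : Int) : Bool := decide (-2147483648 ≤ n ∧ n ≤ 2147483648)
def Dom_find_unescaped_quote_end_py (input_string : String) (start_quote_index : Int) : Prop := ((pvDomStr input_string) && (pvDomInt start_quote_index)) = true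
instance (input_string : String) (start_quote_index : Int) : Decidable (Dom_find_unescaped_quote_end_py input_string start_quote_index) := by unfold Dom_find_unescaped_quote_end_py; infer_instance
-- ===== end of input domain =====

-- B replaces A's per-quote backward backslash-count by one forward pass with an escape-state
-- toggle, seeded once; B clamps the scan start to 0 where A's negative index wraps (see D_).
-- Loops are ported as structural recursion on a fuel equal to the remaining iteration count.

-- ===== PORT A =====
-- A's inner while loop: count backslashes at indices j, j-1, … (fuel (j+1).toNat = indices ≥ 0 left)
def pvCntBSAux (cs : List Char) : Nat → Int → Nat
  | 0, _ => 0
  | f + 1, j => if PySem.List.pyGet? cs j = some '\\' then pvCntBSAux cs f (j - 1) + 1 else 0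

def pvCntBS (cs : List Char) (j : Int) : Nat := pvCntBSAux cs (j + 1).toNat j

-- A's outer while loop; the `none` branch is Python's IndexError (excluded by Pre_)
def pvALoopAux (cs : List Char) : Nat → Int → Int
  | 0, _ => -1
  | f + 1, cur =>
    match PySem.List.pyGet? cs cur with
    | none => 0
    | some c =>
      if c = '"' then
        if pvCntBS cs (cur - 1) % 2 = 0 then cur else pvALoopAux cs f (cur + 1)
      else pvALoopAux cs f (cur + 1)

def pvALoop (cs : List Char) (cur : Int) : Int := pvALoopAux cs ((cs.length : Int) - cur).toNat cur

def find_unescaped_quote_end_py (input_string : String) (start_quote_index : Int) : Int :=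
  pvALoop input_string.toList (start_quote_index + 1)

-- ===== PORT B =====
-- B's backward while loop: j steps left over the backslash run ending just before the scan start
def pvBBackAux (cs : List Char) : Nat → Int → Int
  | 0, j => j
  | f + 1, j => if 0 ≤ j ∧ PySem.List.pyGet? cs j = some '\\' then pvBBackAux cs f (j - 1) else j

def pvBBack (cs : List Char) (j : Int) : Int := pvBBackAux cs (j + 1).toNat j

-- B's forward for-loop maintaining the escape-state toggle (k always in range; none unreachable)
def pvBFwdAux (cs : List Char) : Nat → Int → Bool → Int
  | 0, _, _ => -1
  | f + 1, k, escaped =>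
    match PySem.List.pyGet? cs k with
    | none => -1
    | some c =>
      if c = '"' ∧ escaped = false then k
      else pvBFwdAux cs f (k + 1) (decide (c = '\\') && !escaped)

def find_unescaped_quote_end_py_alt (input_string : String) (start_quote_index : Int) : Int :=
  if (input_string.toList.length : Int) ≤ max (start_quote_index + 1) 0 then -1
  else
    pvBFwdAux input_string.toList
      ((input_string.toList.length : Int) - max (start_quote_index + 1) 0).toNat
      (max (start_quote_index + 1) 0)
      (decide ((max (start_quote_index + 1) 0 - 1 -
        pvBBack input_string.toList (max (start_quote_index + 1) 0 - 1)) % 2 = 1))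

-- ===== PRECONDITION & SPEC =====
-- Pre_ excludes exactly the inputs where A raises IndexError (scan start below -len(s)).
def Pre_find_unescaped_quote_end_py (input_string : String) (start_quote_index : Int) : Prop :=
  -(PySem.Str.len input_string : Int) ≤ start_quote_index + 1
instance (input_string : String) (start_quote_index : Int) : Decidable (Pre_find_unescaped_quote_end_py input_string start_quote_index) := by unfold Pre_find_unescaped_quote_end_py; infer_instance

def pvWitness_find_unescaped_quote_end_py : String × Int := ("a\\\"b\"c", 1)

-- Length of the backslash run at the end of a list (used only to state D_, independent of the ports)
def pvTrailBS (l : List Char) : Nat := (l.reverse.takeWhile (fun c => c = '\\')).length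

-- The string contains a quote preceded by an even backslash run (an unescaped quote)
def pvHasUnescQuote (cs : List Char) : Prop :=
  ∃ k < cs.length, cs[k]? = some '"' ∧ pvTrailBS (cs.take k) % 2 = 0

-- When start_quote_index+1 is negative, A's wrapped negative current_index makes it return a
-- NEGATIVE index of the first quote in the string's last -(start_quote_index+1) characters;
-- B scans forward from index 0 and returns the first unescaped quote's nonnegative index (or -1),
-- the intended 'index of the next unescaped quote'. D_ holds exactly where those values differ:
-- a quote strictly inside that tail, or a final-character quote while an unescaped quote exists.
def D_find_unescaped_quote_end_py (input_string : String) (start_quote_index : Int) : Prop :=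
  start_quote_index + 1 < 0 ∧
    ('"' ∈ (input_string.toList.drop ((input_string.toList.length : Int) + start_quote_index + 1).toNat).dropLast ∨
      (input_string.toList.getLast? = some '"' ∧ pvHasUnescQuote input_string.toList))
instance (input_string : String) (start_quote_index : Int) : Decidable (D_find_unescaped_quote_end_py input_string start_quote_index) := by unfold D_find_unescaped_quote_end_py pvHasUnescQuote; infer_instance

def Spec_find_unescaped_quote_end_py (input_string : String) (start_quote_index : Int) (out : Int) : Prop := ¬ D_find_unescaped_quote_end_py input_string start_quote_index → out = find_unescaped_quote_end_py_alt input_string start_quote_index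
instance (input_string : String) (start_quote_index : Int) (out : Int) : Decidable (Spec_find_unescaped_quote_end_py input_string start_quote_index out) := by unfold Spec_find_unescaped_quote_end_py; infer_instance

def pvDiffWitness_find_unescaped_quote_end_py : String × Int := ("a\"c", -3)
def pvDiffWitnessOut_find_unescaped_quote_end_py : Int × Int := (-2, 1)

-- ===== CLAIM (what is proved, stated in full; the proofs are below) =====
def Claim_unchanged_find_unescaped_quote_end_py : Prop := ∀ (input_string : String) (start_quote_index : Int), Dom_find_unescaped_quote_end_py input_string start_quote_index → Pre_find_unescaped_quote_end_py input_string start_quote_index → Spec_find_unescaped_quote_end_py input_string start_quote_index (find_unescaped_quote_end_py input_string start_quote_index)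
def Claim_changed_find_unescaped_quote_end_py : Prop := Dom_find_unescaped_quote_end_py (pvDiffWitness_find_unescaped_quote_end_py.1) (pvDiffWitness_find_unescaped_quote_end_py.2) ∧ Pre_find_unescaped_quote_end_py (pvDiffWitness_find_unescaped_quote_end_py.1) (pvDiffWitness_find_unescaped_quote_end_py.2) ∧ D_find_unescaped_quote_end_py (pvDiffWitness_find_unescaped_quote_end_py.1) (pvDiffWitness_find_unescaped_quote_end_py.2) ∧ find_unescaped_quote_end_py (pvDiffWitness_find_unescaped_quote_end_py.1) (pvDiffWitness_find_unescaped_quote_end_py.2) = pvDiffWitnessOut_find_unescaped_quote_end_py.1 ∧ find_unescaped_quote_end_py_alt (pvDiffWitness_find_unescaped_quote_end_py.1) (pvDiffWitness_find_unescaped_quote_end_py.2) = pvDiffWitnessOut_find_unescaped_quote_end_py.2 ∧ pvDiffWitnessOut_find_unescaped_quote_end_py.1 ≠ pvDiffWitnessOut_find_unescaped_quote_end_py.2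
def Claim_exact_find_unescaped_quote_end_py : Prop := ∀ (input_string : String) (start_quote_index : Int), Dom_find_unescaped_quote_end_py input_string start_quote_index → Pre_find_unescaped_quote_end_py input_string start_quote_index → D_find_unescaped_quote_end_py input_string start_quote_index → find_unescaped_quote_end_py input_string start_quote_index ≠ find_unescaped_quote_end_py_alt input_string start_quote_index

-- ===== LEMMAS AND PROOFS =====

theorem pvCntBS_neg (cs : List Char) (j : Int) (hj : j < 0) : pvCntBS cs j = 0 := by
  unfold pvCntBS
  rw [show (j + 1).toNat = 0 by omega]
  rfl

theorem pvCntBS_step (cs : List Char) (k : Int) (hk : 0 ≤ k) (hlt : k < (cs.length : Int)) :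
    pvCntBS cs k = if cs[k.toNat]'(by omega) = '\\' then pvCntBS cs (k - 1) + 1 else 0 := by
  have hget := PySem.List.pyGet?_eq_some_getElem (xs := cs) (i := k) hk hlt
  unfold pvCntBS
  rw [show (k + 1).toNat = k.toNat + 1 by omega, show (k - 1 + 1).toNat = k.toNat by omega]
  rw [pvCntBSAux, hget]
  by_cases hbs : cs[k.toNat]'(by omega) = '\\'
  · rw [if_pos (by rw [hbs]), if_pos hbs]
  · rw [if_neg (by simpa using hbs), if_neg hbs]

theorem pvBBack_diff (cs : List Char) :
    ∀ (f : Nat) (j : Int), f = (j + 1).toNat → j < (cs.length : Int) →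
      j - pvBBackAux cs f j = (pvCntBS cs j : Int) := by
  intro f
  induction f with
  | zero =>
      intro j hf hlt
      rw [pvBBackAux, pvCntBS_neg cs j (by omega)]
      omega
  | succ f ih =>
      intro j hf hlt
      have hj : 0 ≤ j := by omega
      have hget := PySem.List.pyGet?_eq_some_getElem (xs := cs) (i := j) hj hlt
      have hstep := pvCntBS_step cs j hj hlt
      rw [pvBBackAux]
      by_cases hbs : cs[j.toNat]'(by omega) = '\\'
      · rw [if_pos ⟨hj, by rw [hget, hbs]⟩]
        have hih := ih (j - 1) (by omega) (by omega)
        rw [hstep, if_pos hbs]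
        push_cast
        omega
      · rw [if_neg (by rintro ⟨-, hc⟩; rw [hget] at hc; exact hbs (by simpa using hc))]
        rw [hstep, if_neg hbs]
        omega

theorem pvBFwd_eq_pvALoop (cs : List Char) :
    ∀ (f : Nat) (k : Int), 0 ≤ k → f = ((cs.length : Int) - k).toNat →
      pvBFwdAux cs f k (decide (pvCntBS cs (k - 1) % 2 = 1)) = pvALoopAux cs f k := by
  intro f
  induction f with
  | zero => intro k hk hf; rfl
  | succ f ih =>
      intro k hk hf
      have hlt : k < (cs.length : Int) := by omega
      have hget := PySem.List.pyGet?_eq_some_getElem (xs := cs) (i := k) hk hlt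
      have hstep := pvCntBS_step cs k hk hlt
      rw [pvBFwdAux, pvALoopAux, hget]
      simp only
      by_cases hc : cs[k.toNat]'(by omega) = '"'
      · rcases Nat.mod_two_eq_zero_or_one (pvCntBS cs (k - 1)) with hp | hp
        · rw [if_pos ⟨hc, by simp [hp]⟩, if_pos hc, if_pos hp]
        · rw [if_neg (by simp [hp]), if_pos hc, if_neg (by omega)]
          have hnew : (decide (cs[k.toNat]'(by omega) = '\\') && !decide (pvCntBS cs (k - 1) % 2 = 1)) = decide (pvCntBS cs (k + 1 - 1) % 2 = 1) := by
            have hne : cs[k.toNat]'(by omega) ≠ '\\' := by rw [hc]; decide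
            simp only [show k + 1 - 1 = k by ring, hstep, if_neg hne]
            simp [hne]
          rw [hnew]
          exact ih (k + 1) (by omega) (by omega)
      · rw [if_neg (by simp [hc]), if_neg hc]
        have hnew : (decide (cs[k.toNat]'(by omega) = '\\') && !decide (pvCntBS cs (k - 1) % 2 = 1)) = decide (pvCntBS cs (k + 1 - 1) % 2 = 1) := by
          by_cases hbs : cs[k.toNat]'(by omega) = '\\'
          · simp only [show k + 1 - 1 = k by ring, hstep, hbs]
            rcases Nat.mod_two_eq_zero_or_one (pvCntBS cs (k - 1)) with hp | hp <;>
              simp [hp, Nat.add_mod]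
          · simp only [show k + 1 - 1 = k by ring, hstep, if_neg hbs]
            simp [hbs]
        rw [hnew]
        exact ih (k + 1) (by omega) (by omega)

-- A's scan over indices [cur, t) is a no-op when those positions hold no quote
theorem pvALoop_shift (cs : List Char) (t : Int) (ht : t ≤ 0) :
    ∀ (f : Nat) (cur : Int), cur ≤ t → -(cs.length : Int) ≤ cur → f = (t - cur).toNat →
      (∀ (k : Nat) (hk : k < cs.length), (cs.length : Int) + cur ≤ (k : Int) →
        (k : Int) < (cs.length : Int) + t → cs[k] ≠ '"') →
      pvALoop cs cur = pvALoop cs t := by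
  intro f
  induction f with
  | zero =>
      intro cur h0 hlo hf hq
      rw [show cur = t by omega]
  | succ f ih =>
      intro cur h0 hlo hf hq
      have hneg : cur < 0 := by omega
      have hkn : ((cs.length : Int) + cur).toNat < cs.length := by omega
      have hget : PySem.List.pyGet? cs cur = some (cs[((cs.length : Int) + cur).toNat]'hkn) := by
        have := PySem.List.pyGet?_neg_natCast (xs := cs) (k := (-cur).toNat)
          (by omega) (by omega)
        rw [show -(((-cur).toNat : Nat) : Int) = cur by omega] at this
        rw [this, show cs.length - (-cur).toNat = ((cs.length : Int) + cur).toNat by omega,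
          List.getElem?_eq_getElem hkn]
      unfold pvALoop
      rw [show ((cs.length : Int) - cur).toNat = ((cs.length : Int) - (cur + 1)).toNat + 1 by omega]
      rw [pvALoopAux, hget]
      simp only
      rw [if_neg (hq _ hkn (by omega) (by omega))]
      exact ih (cur + 1) (by omega) (by omega) (by omega)
        (fun k hk hge hlt => hq k hk (by omega) hlt)

-- A, started at a negative cur, returns at most p when position p of the wrap holds a quote
theorem pvALoop_le (cs : List Char) :
    ∀ (f : Nat) (cur p : Int), f = (-cur).toNat → cur < 0 → -(cs.length : Int) ≤ cur →
      cur ≤ p → p < 0 → cs[((cs.length : Int) + p).toNat]? = some '"' →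
      pvALoop cs cur ≤ p := by
  intro f
  induction f with
  | zero => intro cur p hf hneg; omega
  | succ f ih =>
      intro cur p hf hneg hlo hcp hp hquote
      have hkn : ((cs.length : Int) + cur).toNat < cs.length := by omega
      have hget : PySem.List.pyGet? cs cur = some (cs[((cs.length : Int) + cur).toNat]'hkn) := by
        have := PySem.List.pyGet?_neg_natCast (xs := cs) (k := (-cur).toNat)
          (by omega) (by omega)
        rw [show -(((-cur).toNat : Nat) : Int) = cur by omega] at this
        rw [this, show cs.length - (-cur).toNat = ((cs.length : Int) + cur).toNat by omega,
          List.getElem?_eq_getElem hkn]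
      unfold pvALoop
      rw [show ((cs.length : Int) - cur).toNat = ((cs.length : Int) - (cur + 1)).toNat + 1 by omega]
      rw [pvALoopAux, hget]
      simp only
      by_cases hc : cs[((cs.length : Int) + cur).toNat]'hkn = '"'
      · rw [if_pos hc, if_pos (by rw [pvCntBS_neg cs (cur - 1) (by omega)])]
        exact hcp
      · rw [if_neg hc]
        have hpc : cur ≠ p := by
          intro h
          subst h
          rw [List.getElem?_eq_getElem hkn] at hquote
          exact hc (by simpa using hquote)
        have := ih (cur + 1) p (by omega) (by omega) (by omega) (by omega) hp hquote
        unfold pvALoop at this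
        exact this

-- B's forward pass never returns below -1 when started at a nonnegative index
theorem pvBFwdAux_ge (cs : List Char) :
    ∀ (f : Nat) (k : Int) (b : Bool), 0 ≤ k → -1 ≤ pvBFwdAux cs f k b := by
  intro f
  induction f with
  | zero => intro k b hk; simp [pvBFwdAux]
  | succ f ih =>
      intro k b hk
      rw [pvBFwdAux]
      rcases hget : PySem.List.pyGet? cs k with _ | c
      · simp
      · simp only
        split
        · omega
        · exact ih (k + 1) _ (by omega)

-- pvTrailBS of a prefix is A's backward backslash count at the preceding index
theorem pvTrail_eq (cs : List Char) :
    ∀ (k : Nat), k ≤ cs.length → pvCntBS cs ((k : Int) - 1) = pvTrailBS (cs.take k) := by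
  intro k
  induction k with
  | zero =>
      intro hk
      rw [pvCntBS_neg cs _ (by omega)]
      rfl
  | succ k ih =>
      intro hk
      have hkn : k < cs.length := by omega
      have hstep := pvCntBS_step cs (k : Int) (by omega) (by omega)
      simp only [Int.toNat_natCast] at hstep
      rw [show ((k + 1 : Nat) : Int) - 1 = (k : Int) by push_cast; omega, hstep]
      rw [List.take_succ, List.getElem?_eq_getElem hkn]
      unfold pvTrailBS
      rw [Option.toList_some, List.reverse_append,
        List.reverse_singleton, List.singleton_append, List.takeWhile_cons]
      by_cases hbs : cs[k]'hkn = '\\'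
      · rw [if_pos hbs, if_pos (by simp [hbs]), List.length_cons]
        rw [ih (by omega)]
        rfl
      · rw [if_neg hbs, if_neg (by simp [hbs])]
        rfl

-- A's scan from a nonnegative index finds some quote when an even-run quote lies ahead
theorem pvALoop_found (cs : List Char) :
    ∀ (f : Nat) (cur : Int), 0 ≤ cur → f = ((cs.length : Int) - cur).toNat →
      (∃ k : Nat, ∃ hk : k < cs.length, cur ≤ (k : Int) ∧ cs[k] = '"' ∧
        pvCntBS cs ((k : Int) - 1) % 2 = 0) →
      0 ≤ pvALoopAux cs f cur := by
  intro f
  induction f with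
  | zero =>
      rintro cur h0 hf ⟨k, hk, hck, -, -⟩
      omega
  | succ f ih =>
      rintro cur h0 hf ⟨k, hk, hck, hq, hev⟩
      have hlt : cur < (cs.length : Int) := by omega
      have hget := PySem.List.pyGet?_eq_some_getElem (xs := cs) (i := cur) h0 hlt
      rw [pvALoopAux, hget]
      simp only
      by_cases hc : cs[cur.toNat]'(by omega) = '"'
      · rw [if_pos hc]
        by_cases hp : pvCntBS cs (cur - 1) % 2 = 0
        · rw [if_pos hp]; omega
        · rw [if_neg hp]
          have hne : cur ≠ (k : Int) := by
            intro h
            rw [show cur - 1 = (k : Int) - 1 by omega] at hp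
            exact hp hev
          exact ih (cur + 1) (by omega) (by omega) ⟨k, hk, by omega, hq, hev⟩
      · rw [if_neg hc]
        have hne : cur ≠ (k : Int) := by
          intro h
          subst h
          simp only [Int.toNat_natCast] at hc
          exact hc hq
        exact ih (cur + 1) (by omega) (by omega) ⟨k, hk, by omega, hq, hev⟩

-- A's scan from a nonnegative index returns -1 when every quote ahead has an odd run
theorem pvALoop_none (cs : List Char) :
    ∀ (f : Nat) (cur : Int), 0 ≤ cur → f = ((cs.length : Int) - cur).toNat →
      (∀ (k : Nat) (hk : k < cs.length), cs[k] = '"' → pvCntBS cs ((k : Int) - 1) % 2 = 1) →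
      pvALoopAux cs f cur = -1 := by
  intro f
  induction f with
  | zero => intro cur h0 hf hodd; rfl
  | succ f ih =>
      intro cur h0 hf hodd
      have hlt : cur < (cs.length : Int) := by omega
      have hget := PySem.List.pyGet?_eq_some_getElem (xs := cs) (i := cur) h0 hlt
      rw [pvALoopAux, hget]
      simp only
      by_cases hc : cs[cur.toNat]'(by omega) = '"'
      · rw [if_pos hc, if_neg (by
          have := hodd cur.toNat (by omega) hc
          rw [show ((cur.toNat : Nat) : Int) - 1 = cur - 1 by omega] at this
          omega)]
        exact ih (cur + 1) (by omega) (by omega) hodd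
      · rw [if_neg hc]
        exact ih (cur + 1) (by omega) (by omega) hodd

-- A started at -1 on a string whose last character is a quote returns -1
theorem pvALoop_neg_one (cs : List Char) (h1 : 0 < cs.length)
    (hq : cs.getLast? = some '"') : pvALoop cs (-1) = -1 := by
  unfold pvALoop
  rw [show ((cs.length : Int) - (-1)).toNat = cs.length + 1 by omega]
  rw [pvALoopAux, PySem.List.pyGet?_neg_one, hq]
  simp only
  rw [if_pos (by trivial), if_pos (by rw [pvCntBS_neg cs (-1 - 1) (by omega)])]

-- B's value at a negative scan start is A's scan from 0 (shared by _spec and _tight below)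
theorem pvAlt_neg (cs : List Char) (a : Int) (hneg : a < 0) (hn : 0 < cs.length) :
    (if (cs.length : Int) ≤ max a 0 then -1
      else pvBFwdAux cs ((cs.length : Int) - max a 0).toNat (max a 0)
        (decide ((max a 0 - 1 - pvBBack cs (max a 0 - 1)) % 2 = 1))) = pvALoop cs 0 := by
  rw [show max a 0 = 0 by omega, if_neg (by omega)]
  have hseed : decide ((0 - 1 - pvBBack cs (0 - 1)) % 2 = 1) =
      decide (pvCntBS cs ((0 : Int) - 1) % 2 = 1) := by
    rw [pvCntBS_neg cs ((0 : Int) - 1) (by omega)]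
    rfl
  rw [hseed]
  exact pvBFwd_eq_pvALoop cs ((cs.length : Int) - 0).toNat 0 (by omega) rfl

-- ===== VERDICT (by name: the statements are the Claim_ definitions above) =====
theorem find_unescaped_quote_end_py_spec : Claim_unchanged_find_unescaped_quote_end_py := by
  intro s i _ hpre
  unfold Spec_find_unescaped_quote_end_py
  intro hnd
  unfold Pre_find_unescaped_quote_end_py at hpre
  rw [PySem.Str.len_eq] at hpre
  unfold D_find_unescaped_quote_end_py at hnd
  push_neg at hnd
  unfold find_unescaped_quote_end_py find_unescaped_quote_end_py_alt
  generalize hgen : s.toList = cs at hpre hnd ⊢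
  by_cases h0 : 0 ≤ i + 1
  · rw [show max (i + 1) 0 = i + 1 by omega]
    by_cases hn : (cs.length : Int) ≤ i + 1
    · rw [if_pos hn]
      unfold pvALoop
      rw [show ((cs.length : Int) - (i + 1)).toNat = 0 by omega]
      rfl
    · rw [if_neg hn]
      have hdiff := pvBBack_diff cs (i + 1 - 1 + 1).toNat (i + 1 - 1) rfl (by omega)
      have hseed : decide ((i + 1 - 1 - pvBBack cs (i + 1 - 1)) % 2 = 1) =
          decide (pvCntBS cs (i + 1 - 1) % 2 = 1) := by
        unfold pvBBack
        exact decide_eq_decide.mpr (by omega)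
      rw [hseed]
      exact (pvBFwd_eq_pvALoop cs ((cs.length : Int) - (i + 1)).toNat (i + 1) h0 rfl).symm
  · -- negative scan start: ¬D_ leaves at most an escaped final quote on the wrapped tail
    obtain ⟨hnmid, hnlast⟩ := hnd (by omega)
    have hn1 : 0 < cs.length := by omega
    rw [pvAlt_neg cs (i + 1) (by omega) hn1]
    have hmid : ∀ (k : Nat) (hk : k < cs.length),
        (cs.length : Int) + (i + 1) ≤ (k : Int) → (k : Int) < (cs.length : Int) - 1 →
        cs[k] ≠ '"' := by
      intro k hk hge hlt hc
      refine hnmid ?_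
      rw [show ((cs.length : Int) + i + 1).toNat = ((cs.length : Int) + (i + 1)).toNat by omega]
      refine List.mem_iff_getElem.mpr ⟨k - ((cs.length : Int) + (i + 1)).toNat, by
        rw [List.length_dropLast, List.length_drop]; omega, ?_⟩
      rw [List.getElem_dropLast, List.getElem_drop, ← hc]
      congr 1
      omega
    by_cases hlast : cs.getLast? = some '"'
    · -- the final character is an escaped quote: both scans end with -1
      have hodd : ∀ (k : Nat) (hk : k < cs.length), cs[k] = '"' →
          pvCntBS cs ((k : Int) - 1) % 2 = 1 := by
        intro k hk hq
        have hun := hnlast hlast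
        unfold pvHasUnescQuote at hun
        push_neg at hun
        have := hun k hk (by rw [List.getElem?_eq_getElem hk, hq])
        rw [pvTrail_eq cs k (by omega)]
        omega
      rw [pvALoop_shift cs (-1) (by omega) ((-1) - (i + 1)).toNat (i + 1) (by omega)
        (by omega) rfl (fun k hk hge hlt => hmid k hk hge (by omega))]
      rw [pvALoop_neg_one cs hn1 hlast]
      exact (pvALoop_none cs ((cs.length : Int) - 0).toNat 0 (by omega) rfl hodd).symm
    · -- no quote anywhere on the wrapped tail: A's wrap is a no-op
      have hall : ∀ (k : Nat) (hk : k < cs.length),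
          (cs.length : Int) + (i + 1) ≤ (k : Int) → (k : Int) < (cs.length : Int) + 0 →
          cs[k] ≠ '"' := by
        intro k hk hge hlt hc
        by_cases hk1 : (k : Int) < (cs.length : Int) - 1
        · exact hmid k hk hge hk1 hc
        · refine hlast ?_
          rw [List.getLast?_eq_getElem?, show cs.length - 1 = k by omega,
            List.getElem?_eq_getElem hk, hc]
      exact pvALoop_shift cs 0 (by omega) (0 - (i + 1)).toNat (i + 1) (by omega)
        (by omega) rfl hall

theorem find_unescaped_quote_end_py_changed : Claim_changed_find_unescaped_quote_end_py := by
  unfold Claim_changed_find_unescaped_quote_end_py; decide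

theorem find_unescaped_quote_end_py_tight : Claim_exact_find_unescaped_quote_end_py := by
  intro s i _ hpre hd
  unfold Pre_find_unescaped_quote_end_py at hpre
  rw [PySem.Str.len_eq] at hpre
  unfold D_find_unescaped_quote_end_py at hd
  unfold find_unescaped_quote_end_py find_unescaped_quote_end_py_alt
  generalize hgen : s.toList = cs at hpre hd ⊢
  obtain ⟨hneg, hcase⟩ := hd
  have hn1 : 0 < cs.length := by omega
  rw [pvAlt_neg cs (i + 1) hneg hn1]
  rcases hcase with hmid | ⟨hlast, hun⟩
  · -- a quote strictly inside the tail: A ≤ -2 while B ≥ -1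
    obtain ⟨j, hj, hq⟩ := List.mem_iff_getElem.mp hmid
    rw [List.length_dropLast, List.length_drop] at hj
    rw [List.getElem_dropLast, List.getElem_drop] at hq
    have hm : ((cs.length : Int) + i + 1).toNat ≤ cs.length := by omega
    have hA : pvALoop cs (i + 1) ≤ ((((cs.length : Int) + i + 1).toNat + j : Nat) : Int) -
        (cs.length : Int) := by
      refine pvALoop_le cs (-(i + 1)).toNat (i + 1) _ rfl hneg (by omega) (by omega)
        (by omega) ?_
      rw [show ((cs.length : Int) + (((((cs.length : Int) + i + 1).toNat + j : Nat) : Int) -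
        (cs.length : Int))).toNat = ((cs.length : Int) + i + 1).toNat + j by omega]
      rw [List.getElem?_eq_getElem (by omega), hq]
    have hB : -1 ≤ pvALoop cs 0 := by
      rw [← pvAlt_neg cs (i + 1) hneg hn1, show max (i + 1) 0 = 0 by omega,
        if_neg (by omega)]
      exact pvBFwdAux_ge cs _ 0 _ (by omega)
    omega
  · -- escaped-tail final quote but an unescaped quote exists: A ≤ -1 while B ≥ 0
    have hA : pvALoop cs (i + 1) ≤ -1 := by
      refine pvALoop_le cs (-(i + 1)).toNat (i + 1) (-1) rfl hneg (by omega) (by omega)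
        (by omega) ?_
      rw [List.getLast?_eq_getElem?] at hlast
      rw [show ((cs.length : Int) + (-1)).toNat = cs.length - 1 by omega]
      exact hlast
    have hB : 0 ≤ pvALoop cs 0 := by
      obtain ⟨k, hk, hq, hev⟩ := hun
      rw [List.getElem?_eq_getElem hk] at hq
      refine pvALoop_found cs ((cs.length : Int) - 0).toNat 0 (by omega) rfl
        ⟨k, hk, by omega, by simpa using hq, ?_⟩
      rw [pvTrail_eq cs k (by omega)]
      exact hev
    omega
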